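-- pv_equiv track=rewrite | github.com/mulle-cc/roam-code | src/roam/languages/foxpro_lang.py | _extract_procedures
-- ===== SOURCE A (Python) =====
-- def _extract_procedures(methods_text: str) -> list[dict]:
--     """Split PROCEDURE/FUNCTION blocks from a Methods field.
--
--     Returns list of dicts with keys: type, name, code.
--     """
--     if not methods_text:
--         return []
--     procedures = []
--     current_name = None
--     current_type = None
--     current_lines: list[str] = []
--
--     for line in methods_text.split("\n"):
--         stripped = line.strip()
--         upper = stripped.upper()
--         if upper.startswith("PROCEDURE ") or upper.startswith("FUNCTION "):
--             if current_name is not None: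
--                 procedures.append({
--                     "type": current_type,
--                     "name": current_name,
--                     "code": "\n".join(current_lines),
--                 })
--             parts = stripped.split(None, 1)
--             current_type = parts[0].upper()
--             current_name = parts[1] if len(parts) > 1 else ""
--             current_lines = [line]
--         elif upper.startswith("ENDPROC") or upper.startswith("ENDFUNC"):
--             if current_name is not None:
--                 current_lines.append(line)
--                 procedures.append({
--                     "type": current_type,
--                     "name": current_name,
--                     "code": "\n".join(current_lines),
--                 })
--                 current_name = None
--                 current_type = None
--                 current_lines = []
--         else:
--             if current_name is not None:
--                 current_lines.append(line)
--
--     # Handle last procedure (may lack ENDPROC)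
--     if current_name is not None:
--         procedures.append({
--             "type": current_type,
--             "name": current_name,
--             "code": "\n".join(current_lines),
--         })
--     return procedures
-- ===== SOURCE B (Python) =====
-- def _classify(i, line):
--     """Classify one line: header mark, end mark, or None for plain text."""
--     s = line.strip()
--     u = s.upper()
--     if u.startswith("PROCEDURE ") or u.startswith("FUNCTION "):
--         parts = s.split(None, 1)
--         return (i, True, parts[0].upper(), parts[1] if len(parts) > 1 else "")
--     if u.startswith("ENDPROC") or u.startswith("ENDFUNC"):
--         return (i, False, "", "")
--     return None
--
--
-- def _extract_procedures(methods_text: str) -> list[dict]: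
--     """Two-pass variant: classify marker lines first, then walk the marker
--     list keeping one open block and build each code body by slicing."""
--     if not methods_text:
--         return []
--     lines = methods_text.split("\n")
--     marks = [m for m in (_classify(i, l) for i, l in enumerate(lines)) if m is not None]
--     procs = []
--     open_ = None  # (start_index, type, name)
--     for i, is_header, t, n in marks:
--         if is_header:
--             if open_ is not None:
--                 s0, t0, n0 = open_
--                 procs.append({"type": t0, "name": n0, "code": "\n".join(lines[s0:i])})
--             open_ = (i, t, n)
--         else:
--             if open_ is not None:
--                 s0, t0, n0 = open_
--                 procs.append({"type": t0, "name": n0, "code": "\n".join(lines[s0:i + 1])})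
--                 open_ = None
--     if open_ is not None:
--         s0, t0, n0 = open_
--         procs.append({"type": t0, "name": n0, "code": "\n".join(lines[s0:])})
--     return procs
-- ===== Notes on version B (the rewrite author's own statement) =====
-- stated objective: alternative
-- what changed: Replaces A's single stateful line loop (accumulating current_lines as it goes) with a two-pass decomposition: a first pass classifies each line into a marker list (header/end with parsed type and name), and a second pass walks only the markers, keeping one open block and building each code body by slicing the original line list.
import Mathlib
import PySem

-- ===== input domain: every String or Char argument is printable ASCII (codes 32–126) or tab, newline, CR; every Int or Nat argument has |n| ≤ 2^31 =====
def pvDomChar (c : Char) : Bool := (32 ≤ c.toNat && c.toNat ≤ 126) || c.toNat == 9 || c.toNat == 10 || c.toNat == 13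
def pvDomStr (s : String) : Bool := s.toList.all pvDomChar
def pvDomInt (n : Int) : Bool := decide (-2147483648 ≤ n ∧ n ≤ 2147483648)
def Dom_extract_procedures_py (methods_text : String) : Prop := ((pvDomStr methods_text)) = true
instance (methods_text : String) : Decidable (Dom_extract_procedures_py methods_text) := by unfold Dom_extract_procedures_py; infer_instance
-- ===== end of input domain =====

-- B is a different decomposition of the same extraction (classify-then-walk over a marker
-- list, code bodies built by slicing the line list), proved to return exactly A's value.

-- the dict {"type": t, "name": n, "code": "\n".join(ls)} both Pythons build
def pvProc (t n : String) (ls : List String) : List (String × String) :=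
  [("type", t), ("name", n), ("code", PySem.Str.join "\n" ls)]

-- ===== PORT A =====
-- A's loop state: (procedures, current_name, current_type, current_lines).
def pvStepA (st : List (List (String × String)) × Option String × Option String × List String)
    (line : String) : List (List (String × String)) × Option String × Option String × List String :=
  let (procs, cn, ct, cl) := st
  let stripped := PySem.Str.strip line
  let upper := PySem.Str.upper stripped
  if PySem.Str.startswith upper "PROCEDURE " || PySem.Str.startswith upper "FUNCTION " then
    let procs := if cn.isSome then procs ++ [pvProc (ct.getD "") (cn.getD "") cl] else procs
    let parts := PySem.Str.split₀Max stripped 1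
    -- parts[0]: stripped is nonempty here, so parts is nonempty and headD never defaults
    (procs, some (parts.getD 1 ""), some (PySem.Str.upper (parts.headD "")), [line])
  else if PySem.Str.startswith upper "ENDPROC" || PySem.Str.startswith upper "ENDFUNC" then
    if cn.isSome then
      (procs ++ [pvProc (ct.getD "") (cn.getD "") (cl ++ [line])], none, none, [])
    else (procs, cn, ct, cl)
  else
    if cn.isSome then (procs, cn, ct, cl ++ [line]) else (procs, cn, ct, cl)

def extract_procedures_py (methods_text : String) : List (List (String × String)) :=
  if methods_text = "" then [] else
  let r := (((PySem.Str.split? methods_text "\n").getD [])).foldl pvStepA ([], none, none, [])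
  let (procs, cn, ct, cl) := r
  if cn.isSome then procs ++ [pvProc (ct.getD "") (cn.getD "") cl] else procs

-- ===== PORT B =====
-- classify one line: some (i, true, type, name) = header, some (i, false, _, _) = end marker
def pvClassify (i : Int) (line : String) : Option (Int × Bool × String × String) :=
  let s := PySem.Str.strip line
  let u := PySem.Str.upper s
  if PySem.Str.startswith u "PROCEDURE " || PySem.Str.startswith u "FUNCTION " then
    let parts := PySem.Str.split₀Max s 1
    some (i, true, PySem.Str.upper (parts.headD ""), parts.getD 1 "")
  else if PySem.Str.startswith u "ENDPROC" || PySem.Str.startswith u "ENDFUNC" then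
    some (i, false, "", "")
  else none

-- walk the marker list: state (procs, open block = (start index, type, name))
def pvStepB (lines : List String)
    (st : List (List (String × String)) × Option (Int × String × String))
    (m : Int × Bool × String × String) :
    List (List (String × String)) × Option (Int × String × String) :=
  let (procs, op) := st
  let (i, isHeader, t, n) := m
  if isHeader then
    match op with
    | some (s0, t0, n0) =>
        (procs ++ [pvProc t0 n0 (PySem.List.slice lines (some s0) (some i))], some (i, t, n))
    | none => (procs, some (i, t, n))
  else
    match op with
    | some (s0, t0, n0) =>
        (procs ++ [pvProc t0 n0 (PySem.List.slice lines (some s0) (some (i + 1)))], none)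
    | none => (procs, none)

def extract_procedures_py_alt (methods_text : String) : List (List (String × String)) :=
  if methods_text = "" then [] else
  let lines := ((PySem.Str.split? methods_text "\n").getD [])
  let marks := (PySem.List.enumerate lines).filterMap (fun p => pvClassify p.1 p.2)
  let r := marks.foldl (pvStepB lines) ([], none)
  let (procs, op) := r
  match op with
  | some (s0, t0, n0) => procs ++ [pvProc t0 n0 (PySem.List.slice lines (some s0) none)]
  | none => procs

-- ===== PRECONDITION & SPEC =====
def Spec_extract_procedures_py (methods_text : String) (out : List (List (String × String))) : Prop := out = extract_procedures_py_alt methods_text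
instance (methods_text : String) (out : List (List (String × String))) : Decidable (Spec_extract_procedures_py methods_text out) := by unfold Spec_extract_procedures_py; infer_instance

-- ===== CLAIM (what is proved, stated in full; the proofs are below) =====
def Claim_equal_extract_procedures_py : Prop := ∀ (methods_text : String), Dom_extract_procedures_py methods_text → Spec_extract_procedures_py methods_text (extract_procedures_py methods_text)

-- ===== LEMMAS AND PROOFS =====

-- A's trailing "handle last procedure" step
def pvFinishA (r : List (List (String × String)) × Option String × Option String × List String) :
    List (List (String × String)) :=
  let (procs, cn, ct, cl) := r
  if cn.isSome then procs ++ [pvProc (ct.getD "") (cn.getD "") cl] else procs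

-- B's pass 2 including its trailing step, over a given marker list
def pvRunB (lines : List String) (ms : List (Int × Bool × String × String))
    (st : List (List (String × String)) × Option (Int × String × String)) :
    List (List (String × String)) :=
  let r := ms.foldl (pvStepB lines) st
  match r.2 with
  | some (s0, t0, n0) => r.1 ++ [pvProc t0 n0 (PySem.List.slice lines (some s0) none)]
  | none => r.1

theorem pv_take_snoc (xs : List String) (s0 k : Nat) (hs : s0 ≤ k) (hk : k < xs.length) :
    (xs.drop s0).take (k - s0) ++ [xs[k]] = (xs.drop s0).take (k + 1 - s0) := by
  have h1 : k + 1 - s0 = (k - s0) + 1 := by omega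
  have h2 : k - s0 < (xs.drop s0).length := by simp [List.length_drop]; omega
  rw [h1, List.take_add_one]
  have : (xs.drop s0)[k - s0]? = some xs[k] := by
    rw [List.getElem?_eq_getElem h2]
    congr 1
    rw [List.getElem_drop]
    congr 1; omega
  simp [this]

-- main invariant: running A's loop on the suffix lines.drop k equals B's pass 2 on the
-- markers of that suffix (enumerated from k), for corresponding states
theorem pv_run_eq (lines : List String) (suf : List String) : ∀ (k : Nat),
    lines.drop k = suf → ∀ (procs : List (List (String × String))),
    (pvFinishA (suf.foldl pvStepA (procs, none, none, [])) =
      pvRunB lines ((PySem.List.enumerate suf (k : Int)).filterMap (fun p => pvClassify p.1 p.2))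
        (procs, none))
    ∧ (∀ (s0 : Nat) (t0 n0 : String), s0 ≤ k →
      pvFinishA (suf.foldl pvStepA (procs, some n0, some t0, (lines.drop s0).take (k - s0))) =
        pvRunB lines ((PySem.List.enumerate suf (k : Int)).filterMap (fun p => pvClassify p.1 p.2))
          (procs, some ((s0 : Int), t0, n0))) := by
  induction suf with
  | nil =>
      intro k hk procs
      constructor
      · simp [pvFinishA, pvRunB, PySem.List.enumerate]
      · intro s0 t0 n0 hs
        have hlen : lines.length ≤ k := by
          have := congrArg List.length hk; simp at this; omega
        have hfull : (lines.drop s0).take (k - s0) = lines.drop s0 := by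
          apply List.take_of_length_le; simp [List.length_drop]; omega
        simp [pvFinishA, pvRunB, PySem.List.enumerate, hfull,
          PySem.List.slice_from_natCast]
  | cons l rest ih =>
      intro k hk procs
      have hklt : k < lines.length := by
        by_contra h
        rw [List.drop_eq_nil_of_le (by omega)] at hk
        exact List.cons_ne_nil _ _ hk.symm
      have hget : lines[k] = l := by
        have h := congrArg List.head? hk
        rw [List.head?_drop] at h
        simpa [List.getElem?_eq_getElem hklt] using h
      have hrest : lines.drop (k + 1) = rest := by
        have : lines.drop (k + 1) = (lines.drop k).drop 1 := by
          rw [List.drop_drop]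
        rw [this, hk]; rfl
      have ihr := ih (k + 1) hrest
      have hcast : ((k + 1 : Nat) : Int) = (k : Int) + 1 := by push_cast; ring
      -- shared abbreviations for the classification of l
      set s := PySem.Str.strip l with hsdef
      set u := PySem.Str.upper s with hudef
      by_cases h1 : (PySem.Str.startswith u "PROCEDURE " || PySem.Str.startswith u "FUNCTION ") = true
      · -- header line
        set parts := PySem.Str.split₀Max s 1 with hp
        have hcls : pvClassify (k : Int) l =
            some ((k : Int), true, PySem.Str.upper (parts.headD ""), parts.getD 1 "") := by
          simp only [pvClassify, ← hsdef, ← hudef, h1, if_true, ← hp]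
        have htake1 : (lines.drop k).take (k + 1 - k) = [l] := by
          rw [hk]; simp
        constructor
        · simp only [List.foldl_cons, PySem.List.enumerate_cons, List.filterMap_cons, hcls]
          have hA : pvStepA (procs, none, none, []) l =
              (procs, some (parts.getD 1 ""), some (PySem.Str.upper (parts.headD "")), [l]) := by
            simp only [pvStepA, ← hsdef, ← hudef, h1, if_true, ← hp,
              Option.isSome_none, 
              Bool.false_eq_true, if_false]
          rw [hA]
          have := (ihr procs).2 k (PySem.Str.upper (parts.headD "")) (parts.getD 1 "") (by omega)
          rw [htake1, hcast] at this
          rw [this]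
          simp [pvRunB, pvStepB]
        · intro s0 t0 n0 hs
          simp only [List.foldl_cons, PySem.List.enumerate_cons, List.filterMap_cons, hcls]
          have hA : pvStepA (procs, some n0, some t0, (lines.drop s0).take (k - s0)) l =
              (procs ++ [pvProc t0 n0 ((lines.drop s0).take (k - s0))],
               some (parts.getD 1 ""), some (PySem.Str.upper (parts.headD "")), [l]) := by
            simp only [pvStepA, ← hsdef, ← hudef, h1, if_true, ← hp,
              Option.isSome_some, Option.getD_some]
          rw [hA]
          have := (ihr (procs ++ [pvProc t0 n0 ((lines.drop s0).take (k - s0))])).2 k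
            (PySem.Str.upper (parts.headD "")) (parts.getD 1 "") (by omega)
          rw [htake1, hcast] at this
          rw [this]
          simp [pvRunB, pvStepB, PySem.List.slice_natCast]
      · by_cases h2 : (PySem.Str.startswith u "ENDPROC" || PySem.Str.startswith u "ENDFUNC") = true
        · -- end-marker line
          have h1' : (PySem.Str.startswith u "PROCEDURE " || PySem.Str.startswith u "FUNCTION ") = false := by
            simpa using h1
          have hcls : pvClassify (k : Int) l = some ((k : Int), false, "", "") := by
            simp only [pvClassify, ← hsdef, ← hudef, h1', h2, Bool.false_eq_true, if_false, if_true]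
          constructor
          · simp only [List.foldl_cons, PySem.List.enumerate_cons, List.filterMap_cons, hcls]
            have hA : pvStepA (procs, none, none, []) l = (procs, none, none, []) := by
              simp only [pvStepA, ← hsdef, ← hudef, h1', h2, Bool.false_eq_true, if_false, if_true,
                Option.isSome_none]
            have h1r := (ihr procs).1
            rw [hcast] at h1r
            rw [hA, h1r]
            simp [pvRunB, pvStepB]
          · intro s0 t0 n0 hs
            simp only [List.foldl_cons, PySem.List.enumerate_cons, List.filterMap_cons, hcls]
            have hA : pvStepA (procs, some n0, some t0, (lines.drop s0).take (k - s0)) l =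
                (procs ++ [pvProc t0 n0 ((lines.drop s0).take (k - s0) ++ [l])],
                 none, none, []) := by
              simp only [pvStepA, ← hsdef, ← hudef, h1', h2, Bool.false_eq_true, if_false, if_true,
                Option.isSome_some, Option.getD_some]
            rw [hA]
            have hsn : (lines.drop s0).take (k - s0) ++ [l] =
                (lines.drop s0).take (k + 1 - s0) := by
              rw [← hget]; exact pv_take_snoc lines s0 k hs hklt
            have h1r := (ihr (procs ++ [pvProc t0 n0 ((lines.drop s0).take (k + 1 - s0))])).1
            rw [hcast] at h1r
            rw [hsn, h1r]
            have hslice : PySem.List.slice lines (some (s0 : Int)) (some ((k : Int) + 1)) =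
                (lines.drop s0).take (k + 1 - s0) := by
              have : ((k : Int) + 1) = ((k + 1 : Nat) : Int) := by push_cast; ring
              rw [this, PySem.List.slice_natCast]
            simp [pvRunB, pvStepB, hslice]
        · -- plain line
          have h1' : (PySem.Str.startswith u "PROCEDURE " || PySem.Str.startswith u "FUNCTION ") = false := by
            simpa using h1
          have h2' : (PySem.Str.startswith u "ENDPROC" || PySem.Str.startswith u "ENDFUNC") = false := by
            simpa using h2
          have hcls : pvClassify (k : Int) l = none := by
            simp only [pvClassify, ← hsdef, ← hudef, h1', h2', Bool.false_eq_true, if_false]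
          constructor
          · simp only [List.foldl_cons, PySem.List.enumerate_cons, List.filterMap_cons, hcls]
            have hA : pvStepA (procs, none, none, []) l = (procs, none, none, []) := by
              simp only [pvStepA, ← hsdef, ← hudef, h1', h2, Bool.false_eq_true, if_false, 
                Option.isSome_none, ]
            have h1r := (ihr procs).1
            rw [hcast] at h1r
            rw [hA]; exact h1r
          · intro s0 t0 n0 hs
            simp only [List.foldl_cons, PySem.List.enumerate_cons, List.filterMap_cons, hcls]
            have hA : pvStepA (procs, some n0, some t0, (lines.drop s0).take (k - s0)) l =
                (procs, some n0, some t0, (lines.drop s0).take (k - s0) ++ [l]) := by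
              simp only [pvStepA, ← hsdef, ← hudef, h1', h2, Bool.false_eq_true, if_false, if_true,
                Option.isSome_some, Option.getD_some]
            rw [hA]
            have hsn : (lines.drop s0).take (k - s0) ++ [l] =
                (lines.drop s0).take (k + 1 - s0) := by
              rw [← hget]; exact pv_take_snoc lines s0 k hs hklt
            have h2r := (ihr procs).2 s0 t0 n0 (by omega)
            rw [hcast] at h2r
            rw [hsn]; exact h2r

-- ===== VERDICT (by name: the statement is the Claim_ definition above) =====
theorem extract_procedures_py_spec : Claim_equal_extract_procedures_py := by
  intro methods_text _
  unfold Spec_extract_procedures_py extract_procedures_py extract_procedures_py_alt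
  by_cases h : methods_text = ""
  · simp [h]
  · simp only [h, if_false]
    have := (pv_run_eq (((PySem.Str.split? methods_text "\n").getD []))
      (((PySem.Str.split? methods_text "\n").getD [])) 0 (by simp) []).1
    simpa [pvFinishA, pvRunB] using this
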